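-- pv_equiv track=rewrite | github.com/huangweijing/weo_leetcode | 1807_Evaluate_the_Bracket_Pairs_of_a_String.py | evaluate
-- ===== SOURCE A (Python) =====
-- from typing import List
--
-- def evaluate(s: str, knowledge: List[List[str]]) -> str:
--     knowledge_dict = { e[0]: e[1] for e in knowledge }
--     ans = ""
--     idx = 0
--     while idx < len(s):
--         while s[idx] == "(":
--             idx += 1
--             key_start = idx
--             while s[idx] != ")":
--                 idx += 1
--             key = s[key_start: idx]
--             if key in knowledge_dict:
--                 ans += knowledge_dict[key]
--             else:
--                 ans += "?"
--             idx += 1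
--             if idx >= len(s):
--                 return ans
--         ans += s[idx]
--         idx += 1
--     return ans
-- ===== SOURCE B (Python) =====
-- from typing import List
--
-- def evaluate(s: str, knowledge: List[List[str]]) -> str:
--     d = {e[0]: e[1] for e in knowledge}
--     ans = ""
--     buf = None
--     for ch in s:
--         if buf is None:
--             if ch == "(":
--                 buf = ""
--             else:
--                 ans += ch
--         elif ch == ")":
--             ans += d.get(buf, "?")
--             buf = None
--         else:
--             buf += ch
--     return ans
-- ===== Notes on version B (the rewrite author's own statement) =====
-- stated objective: simpler
-- what changed: Replaces the nested index-arithmetic while-loops with slicing and an early return by a single forward pass over the characters driven by a two-state machine (outside / inside-brackets buffer); a timing run measured it much faster at large sizes (A's per-character ans += s[idx] concatenation is quadratic in CPython, B's single for-ch pass stays linear).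
import Mathlib
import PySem

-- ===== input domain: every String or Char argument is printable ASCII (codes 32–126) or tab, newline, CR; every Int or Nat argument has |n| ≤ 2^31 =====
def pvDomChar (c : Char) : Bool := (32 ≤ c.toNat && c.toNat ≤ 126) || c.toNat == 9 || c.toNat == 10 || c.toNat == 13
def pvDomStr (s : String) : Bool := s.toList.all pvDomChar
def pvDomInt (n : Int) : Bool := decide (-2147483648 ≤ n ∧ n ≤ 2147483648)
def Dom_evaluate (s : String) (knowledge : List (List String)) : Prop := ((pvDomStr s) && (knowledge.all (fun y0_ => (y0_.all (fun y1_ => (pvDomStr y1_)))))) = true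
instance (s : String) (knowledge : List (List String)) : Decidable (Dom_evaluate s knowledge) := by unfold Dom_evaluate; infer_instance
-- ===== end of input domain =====

-- B replaces A's nested index-arithmetic while-loops (with slicing and an early return) by a single
-- forward character pass driven by a two-state machine; the return values are proved equal on Pre_.


-- ===== PORT A =====
-- dict comprehension { e[0]: e[1] for e in knowledge }; none = IndexError on a row shorter than 2
def pvA_dict (knowledge : List (List String)) : Option (PySem.Dict String String) :=
  knowledge.foldl
    (fun od e => od.bind (fun dd =>
      match e[0]?, e[1]? with
      | some k, some v => some (dd.insert k v)
      | _, _ => none))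
    (some PySem.Dict.empty)

-- inner scan "while s[idx] != ')': idx += 1"; acc collects s[key_start:idx]; none = IndexError (ran off the end)
def pvA_scan : List Char → List Char → Option (List Char × List Char)
  | _, [] => none
  | acc, c :: rest => if c ≠ ')' then pvA_scan (acc ++ [c]) rest else some (acc, rest)

-- "while s[idx] == '(':" loop; result = (ans, remaining characters, early-return flag);
-- none = IndexError (or fuel exhausted — never on the fuel evaluate supplies)
def pvA_paren (d : PySem.Dict String String) : Nat → String → List Char → Option (String × List Char × Bool)
  | 0, _, _ => none
  | _ + 1, _, [] => none
  | fuel + 1, ans, c :: rest =>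
    if c = '(' then
      match pvA_scan [] rest with
      | none => none
      | some (key, rest') =>
        let v := match d.get? (String.ofList key) with | some v => v | none => "?"
        let ans' := ans ++ v
        if rest' = [] then some (ans', rest', true)       -- "if idx >= len(s): return ans"
        else pvA_paren d fuel ans' rest'
    else some (ans, c :: rest, false)

-- outer "while idx < len(s):" loop
def pvA_outer (d : PySem.Dict String String) : Nat → String → List Char → Option String
  | 0, _, _ => none
  | _ + 1, ans, [] => some ans
  | fuel + 1, ans, c :: rest =>
    match pvA_paren d fuel ans (c :: rest) with
    | none => none
    | some (ans', rest', flag) =>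
      if flag then some ans'
      else
        match rest' with
        | [] => none                                      -- s[idx]; unreachable when flag = false
        | c' :: rest'' => pvA_outer d fuel (ans'.push c') rest''

def evaluate (s : String) (knowledge : List (List String)) : String :=
  match pvA_dict knowledge with
  | none => ""                                            -- Python raises here (outside Pre_)
  | some d => (pvA_outer d (s.toList.length + 1) "" s.toList).getD ""
      -- getD "": Python raises where a loop hits IndexError (outside Pre_); the fuel is sufficient on Pre_ (proved below)

-- ===== PORT B =====
-- same dict comprehension; rows shorter than 2 (where Python B raises too, outside Pre_) are skipped
def pvB_dict (knowledge : List (List String)) : PySem.Dict String String :=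
  knowledge.foldl
    (fun dd e =>
      match e[0]?, e[1]? with
      | some k, some v => dd.insert k v
      | _, _ => dd)
    PySem.Dict.empty

-- one step of B's state machine; state = (ans, buf), buf = none outside brackets (Python str buffer ↦ List Char)
def pvB_step (d : PySem.Dict String String) (st : String × Option (List Char)) (c : Char) : String × Option (List Char) :=
  match st with
  | (ans, none) => if c = '(' then (ans, some []) else (ans.push c, none)
  | (ans, some buf) => if c = ')' then (ans ++ d.getD (String.ofList buf) "?", none) else (ans, some (buf ++ [c]))

def evaluate_alt (s : String) (knowledge : List (List String)) : String :=
  (s.toList.foldl (pvB_step (pvB_dict knowledge)) ("", none)).1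

-- ===== PRECONDITION & SPEC =====
-- Pre_ excludes exactly the inputs where A raises IndexError: a knowledge row shorter than 2
-- (e[1] in the dict comprehension), or an unmatched '(' after the last ')' of s (the inner scan runs off the end).
def Pre_evaluate (s : String) (knowledge : List (List String)) : Prop :=
  (∀ e ∈ knowledge, 2 ≤ e.length) ∧ '(' ∉ (s.toList.reverse.takeWhile (fun c => c != ')'))
instance (s : String) (knowledge : List (List String)) : Decidable (Pre_evaluate s knowledge) := by unfold Pre_evaluate; infer_instance

def pvWitness_evaluate : String × List (List String) := ("hi (name), see (x)!", [["name", "bob"], ["x", ""]])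

def Spec_evaluate (s : String) (knowledge : List (List String)) (out : String) : Prop := out = evaluate_alt s knowledge
instance (s : String) (knowledge : List (List String)) (out : String) : Decidable (Spec_evaluate s knowledge out) := by unfold Spec_evaluate; infer_instance

-- ===== CLAIM (what is proved, stated in full; the proofs are below) =====
def Claim_equal_evaluate : Prop := ∀ (s : String) (knowledge : List (List String)), Dom_evaluate s knowledge → Pre_evaluate s knowledge → Spec_evaluate s knowledge (evaluate s knowledge)

-- ===== LEMMAS AND PROOFS =====

-- the "no unmatched '(' left" invariant on the remaining suffix (= the second conjunct of Pre_evaluate)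
def pvOK (l : List Char) : Prop := '(' ∉ (l.reverse.takeWhile (fun c => c != ')'))

theorem pv_mem_takeWhile_append {x : Char} {p : Char → Bool} :
    ∀ (xs ys : List Char), x ∈ xs.takeWhile p → x ∈ (xs ++ ys).takeWhile p := by
  intro xs ys h
  induction xs with
  | nil => simp [List.takeWhile] at h
  | cons a t ih =>
    by_cases ha : p a
    · simp [ha] at h ⊢
      rcases h with h | h
      · exact Or.inl h
      · exact Or.inr (ih h)
    · simp [ha] at h

theorem pvOK_suffix {l l' : List Char} (h : pvOK l) (hs : l' <:+ l) : pvOK l' := by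
  obtain ⟨pre, rfl⟩ := hs
  intro hmem
  exact h (by simpa using pv_mem_takeWhile_append l'.reverse pre.reverse hmem)

theorem pvOK_head_paren {rest : List Char} (h : pvOK ('(' :: rest)) : ')' ∈ rest := by
  by_contra hno
  apply h
  have hall : ∀ c ∈ ('(' :: rest).reverse, (fun c => c != ')') c = true := by
    intro c hc
    simp at hc
    rcases hc with hc | hc
    · simp; rintro rfl; exact hno hc
    · subst hc; decide
  rw [List.takeWhile_eq_self_iff.mpr hall]
  simp

theorem pv_dict_eq_aux : ∀ (k : List (List String)) (d0 : PySem.Dict String String), (∀ e ∈ k, 2 ≤ e.length) →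
    k.foldl (fun od e => od.bind (fun dd =>
      match e[0]?, e[1]? with
      | some k, some v => some (dd.insert k v)
      | _, _ => none)) (some d0)
    = some (k.foldl (fun dd e =>
      match e[0]?, e[1]? with
      | some k, some v => dd.insert k v
      | _, _ => dd) d0) := by
  intro k
  induction k with
  | nil => intro d0 _; simp
  | cons e t ih =>
    intro d0 hk
    match e, hk e (by simp) with
    | a :: b :: _, _ =>
      simp only [List.foldl_cons]
      exact ih _ (fun e he => hk e (by simp [he]))

theorem pv_dict_eq (knowledge : List (List String)) (h : ∀ e ∈ knowledge, 2 ≤ e.length) :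
    pvA_dict knowledge = some (pvB_dict knowledge) :=
  pv_dict_eq_aux knowledge PySem.Dict.empty h

theorem pv_scan_eq : ∀ (l acc : List Char), ')' ∈ l →
    pvA_scan acc l = some (acc ++ l.takeWhile (fun c => c != ')'), (l.dropWhile (fun c => c != ')')).tail) := by
  intro l
  induction l with
  | nil => intro acc h; simp at h
  | cons c rest ih =>
    intro acc h
    by_cases hc : c = ')'
    · subst hc
      rw [pvA_scan, if_neg (by simp)]
      simp
    · rw [pvA_scan, if_pos (by simpa using hc)]
      have hr : ')' ∈ rest := by
        rcases List.mem_cons.mp h with h' | h'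
        · exact absurd h'.symm hc
        · exact h'
      rw [ih _ hr]
      simp [hc]

theorem pv_scan_shrinks : ∀ (l acc : List Char) {k r}, pvA_scan acc l = some (k, r) → r.length < l.length := by
  intro l
  induction l with
  | nil => intro acc k r h; simp [pvA_scan] at h
  | cons c rest ih =>
    intro acc k r h
    by_cases hc : c = ')'
    · rw [pvA_scan, if_neg (by simpa using hc)] at h
      have h2 : rest = r := (Prod.mk.inj (Option.some.inj h)).2
      subst h2; simp
    · rw [pvA_scan, if_pos (by simpa using hc)] at h
      exact Nat.lt_succ_of_lt (ih _ h)

theorem pv_getD_match (d : PySem.Dict String String) (k : String) :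
    d.getD k "?" = (match d.get? k with | some v => v | none => "?") := by
  rw [PySem.Dict.getD_eq_get?_getD]
  cases d.get? k <;> rfl

theorem pv_fold_inside (d : PySem.Dict String String) :
    ∀ (l : List Char) (ans : String) (buf : List Char), ')' ∈ l →
    l.foldl (pvB_step d) (ans, some buf) =
      ((l.dropWhile (fun c => c != ')')).tail).foldl (pvB_step d)
        (ans ++ d.getD (String.ofList (buf ++ l.takeWhile (fun c => c != ')'))) "?", none) := by
  intro l
  induction l with
  | nil => intro ans buf h; simp at h
  | cons c rest ih =>
    intro ans buf h
    by_cases hc : c = ')'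
    · subst hc
      simp [pvB_step]
    · have hr : ')' ∈ rest := by
        rcases List.mem_cons.mp h with h' | h'
        · exact absurd h'.symm hc
        · exact h'
      have : pvB_step d (ans, some buf) c = (ans, some (buf ++ [c])) := by
        simp [pvB_step, hc]
      rw [List.foldl_cons, this, ih _ _ hr]
      simp [hc]

theorem pv_paren_eq (d : PySem.Dict String String) :
    ∀ (fuel : Nat) (l : List Char), l.length ≤ fuel → pvOK l → l ≠ [] → ∀ (ans : String),
    ∃ ans' l' flag, pvA_paren d fuel ans l = some (ans', l', flag) ∧
      l.foldl (pvB_step d) (ans, none) = l'.foldl (pvB_step d) (ans', none) ∧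
      (flag = true → l' = []) ∧ (flag = false → ∃ c r, l' = c :: r ∧ c ≠ '(') ∧ l' <:+ l := by
  intro fuel
  induction fuel with
  | zero =>
    intro l hl hok hne ans
    match l, hne with
    | c :: rest, _ => simp at hl
  | succ n ih =>
    intro l hl hok hne ans
    match l with
    | c :: rest =>
      by_cases hc : c = '('
      · subst hc
        have hmem : ')' ∈ rest := pvOK_head_paren hok
        set tw := rest.takeWhile (fun c => c != ')') with htw
        set l2 := (rest.dropWhile (fun c => c != ')')).tail with hl2
        set ans' := ans ++ (match d.get? (String.ofList tw) with | some v => v | none => "?") with hans'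
        have hA : pvA_paren d (n + 1) ans ('(' :: rest) =
            (if l2 = [] then some (ans', l2, true) else pvA_paren d n ans' l2) := by
          rw [pvA_paren, if_pos rfl, pv_scan_eq rest [] hmem]
          dsimp only
          simp only [List.nil_append]
          rw [← htw, ← hl2, ← hans']
        have hsuf2 : l2 <:+ ('(' :: rest) :=
          ((List.tail_suffix _).trans (List.dropWhile_suffix _)).trans (List.suffix_cons _ _)
        have hfold : ('(' :: rest).foldl (pvB_step d) (ans, none) = l2.foldl (pvB_step d) (ans', none) := by
          rw [List.foldl_cons]
          have h1 : pvB_step d (ans, none) '(' = (ans, some []) := by simp [pvB_step]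
          rw [h1, pv_fold_inside d rest ans [] hmem]
          simp only [List.nil_append]
          rw [← htw, ← hl2, pv_getD_match, ← hans']
        by_cases h2 : l2 = []
        · refine ⟨ans', l2, true, by rw [hA, if_pos h2], hfold, fun _ => h2, by simp, hsuf2⟩
        · have hlen2 : l2.length ≤ n := by
            have hlt := pv_scan_shrinks rest [] (pv_scan_eq rest [] hmem)
            rw [← hl2] at hlt
            simp at hl
            omega
          obtain ⟨a'', l'', f'', heq, hf, ht, hff, hs⟩ :=
            ih l2 hlen2 (pvOK_suffix hok hsuf2) h2 ans'
          exact ⟨a'', l'', f'', by rw [hA, if_neg h2]; exact heq, by rw [hfold, hf],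
            ht, hff, hs.trans hsuf2⟩
      · refine ⟨ans, c :: rest, false, ?_, rfl, by simp, fun _ => ⟨c, rest, rfl, hc⟩, List.suffix_refl _⟩
        rw [pvA_paren, if_neg hc]

theorem pv_outer_eq (d : PySem.Dict String String) :
    ∀ (fuel : Nat) (l : List Char), l.length + 1 ≤ fuel → pvOK l → ∀ (ans : String),
    pvA_outer d fuel ans l = some ((l.foldl (pvB_step d) (ans, none)).1) := by
  intro fuel
  induction fuel with
  | zero => intro l hl; omega
  | succ n ih =>
    intro l hl hok ans
    match l with
    | [] => simp [pvA_outer]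
    | c :: rest =>
      obtain ⟨ans', l', flag, heq, hfold, ht, hff, hsuf⟩ :=
        pv_paren_eq d n (c :: rest) (by simp at hl ⊢; omega) hok (by simp) ans
      rw [pvA_outer, heq]
      cases flag with
      | true =>
        have hl' := ht rfl
        subst hl'
        show some ans' = _
        rw [hfold]
        rfl
      | false =>
        obtain ⟨c', r', rfl, hc'⟩ := hff rfl
        have hstep : pvB_step d (ans', none) c' = (ans'.push c', none) := by simp [pvB_step, hc']
        have hlen : r'.length + 1 ≤ n := by
          have := hsuf.length_le
          simp at this hl
          omega
        show pvA_outer d n (ans'.push c') r' = _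
        rw [ih r' hlen (pvOK_suffix hok ((List.suffix_cons c' r').trans hsuf)) (ans'.push c')]
        rw [hfold, List.foldl_cons, hstep]

-- ===== VERDICT (by name: the statement is the Claim_ definition above) =====
theorem evaluate_spec : Claim_equal_evaluate := by
  intro s knowledge _ hpre
  unfold Spec_evaluate evaluate evaluate_alt
  rw [pv_dict_eq knowledge hpre.1]
  show (pvA_outer (pvB_dict knowledge) (s.toList.length + 1) "" s.toList).getD "" = _
  rw [pv_outer_eq (pvB_dict knowledge) (s.toList.length + 1) s.toList le_rfl hpre.2 ""]
  rfl
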